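-- pv_equiv track=rewrite | github.com/nexus-research-lab/nexus-core | agent/service/session/session_repository.py | _build_round_status
-- ===== SOURCE A (Python) =====
-- from typing import Any, Dict, List, Optional
--
-- def _build_round_status(message_rows: List[Dict[str, Any]]) -> Dict[str, str]:
--     """根据消息快照构建轮次状态。"""
--     status_map: Dict[str, str] = {}
--     for row in message_rows:
--         round_id = row.get("round_id")
--         if not round_id:
--             continue
--         status_map.setdefault(round_id, "running")
--         if row.get("role") == "result":
--             status_map[round_id] = str(row.get("subtype") or "success")
--     return status_map
-- ===== SOURCE B (Python) =====
-- def _build_round_status(message_rows):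
--     """Two-phase rewrite: group rows per truthy round_id, then derive each
--     round's status from the last 'result' row of its group."""
--     index = {}
--     for row in message_rows:
--         rid = row.get("round_id")
--         if rid:
--             index.setdefault(rid, []).append(row)
--     return {
--         rid: _status_of(rows)
--         for rid, rows in index.items()
--     }
--
-- def _status_of(rows):
--     last_result = next((r for r in reversed(rows) if r.get("role") == "result"), None)
--     if last_result is None:
--         return "running"
--     return str(last_result.get("subtype") or "success")
-- ===== Notes on version B (the rewrite author's own statement) =====
-- stated objective: alternative
-- what changed: Replaces A's single pass that mutates the status map per row (setdefault + conditional overwrite) with a two-phase decomposition: first group rows by truthy round_id preserving first-occurrence order, then compute each round's status from the last 'result' row of its group.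
import Mathlib
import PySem

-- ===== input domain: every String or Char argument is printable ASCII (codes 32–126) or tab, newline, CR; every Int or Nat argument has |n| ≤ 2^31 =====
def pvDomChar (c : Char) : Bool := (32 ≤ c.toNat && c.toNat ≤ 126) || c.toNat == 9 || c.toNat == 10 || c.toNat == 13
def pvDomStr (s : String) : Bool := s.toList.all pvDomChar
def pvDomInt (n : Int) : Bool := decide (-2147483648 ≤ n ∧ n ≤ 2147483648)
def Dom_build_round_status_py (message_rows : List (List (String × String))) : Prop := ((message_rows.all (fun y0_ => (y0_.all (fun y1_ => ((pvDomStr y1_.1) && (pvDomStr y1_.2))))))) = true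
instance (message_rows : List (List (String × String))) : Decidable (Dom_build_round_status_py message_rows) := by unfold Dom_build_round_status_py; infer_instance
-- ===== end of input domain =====

-- B restructures A's one mutating pass into group-by-round_id followed by a per-group status computation (alternative decomposition; return value proved equal).

-- ===== PORT A =====
-- one loop: setdefault "running", overwrite on every 'result' row
def build_round_status_py (message_rows : List (List (String × String))) : List (String × String) :=
  (message_rows.foldl (fun status_map row =>
    match (PySem.Dict.mk row).get? "round_id" with
    | none => status_map                         -- `continue` (missing key is falsy)
    | some rid =>
      if rid = "" then status_map else           -- `continue` (empty string is falsy)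
      let d1 := status_map.setdefault rid "running"
      if (PySem.Dict.mk row).get? "role" == some "result" then
        d1.insert rid (match (PySem.Dict.mk row).get? "subtype" with
          | some s => if s = "" then "success" else s    -- str(... or "success")
          | none => "success")
      else d1) PySem.Dict.empty).items

-- ===== PORT B =====
-- B helper: status of one group = last 'result' row's subtype-or-"success", else "running"
def pvStatusOf (rows : List (List (String × String))) : String :=
  match rows.reverse.find? (fun r => (PySem.Dict.mk r).get? "role" == some "result") with
  | none => "running"
  | some r =>
    match (PySem.Dict.mk r).get? "subtype" with
    | some s => if s = "" then "success" else s
    | none => "success"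

def build_round_status_py_alt (message_rows : List (List (String × String))) : List (String × String) :=
  (message_rows.foldl (fun g row =>
    match (PySem.Dict.mk row).get? "round_id" with
    | none => g
    | some rid =>
      if rid = "" then g
      else g.insert rid (g.getD rid [] ++ [row]))   -- index.setdefault(rid, []).append(row)
    PySem.Dict.empty).items.map (fun p => (p.1, pvStatusOf p.2))

-- ===== PRECONDITION & SPEC =====
def Spec_build_round_status_py (message_rows : List (List (String × String))) (out : List (String × String)) : Prop := out = build_round_status_py_alt message_rows
instance (message_rows : List (List (String × String))) (out : List (String × String)) : Decidable (Spec_build_round_status_py message_rows out) := by unfold Spec_build_round_status_py; infer_instance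

-- ===== CLAIM (what is proved, stated in full; the proofs are below) =====
def Claim_equal_build_round_status_py : Prop := ∀ (message_rows : List (List (String × String))), Dom_build_round_status_py message_rows → Spec_build_round_status_py message_rows (build_round_status_py message_rows)

-- ===== LEMMAS AND PROOFS =====

-- the two loop bodies, named for the proofs
def pvStepA (status_map : PySem.Dict String String) (row : List (String × String)) : PySem.Dict String String :=
  match (PySem.Dict.mk row).get? "round_id" with
  | none => status_map
  | some rid =>
    if rid = "" then status_map else
    let d1 := status_map.setdefault rid "running"
    if (PySem.Dict.mk row).get? "role" == some "result" then
      d1.insert rid (match (PySem.Dict.mk row).get? "subtype" with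
        | some s => if s = "" then "success" else s
        | none => "success")
    else d1

def pvStepG (g : PySem.Dict String (List (List (String × String)))) (row : List (String × String)) : PySem.Dict String (List (List (String × String))) :=
  match (PySem.Dict.mk row).get? "round_id" with
  | none => g
  | some rid =>
    if rid = "" then g
    else g.insert rid (g.getD rid [] ++ [row])

-- the invariant tying A's status map to B's grouping index
def pvInv (dA : PySem.Dict String String) (dG : PySem.Dict String (List (List (String × String)))) : Prop :=
  dA.keys = dG.keys ∧ dG.keys.Nodup ∧ ∀ k, dA.get? k = (dG.get? k).map pvStatusOf

lemma pvStatusOf_append (xs : List (List (String × String))) (r : List (String × String)) :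
    pvStatusOf (xs ++ [r]) =
      if (PySem.Dict.mk r).get? "role" == some "result" then
        (match (PySem.Dict.mk r).get? "subtype" with
          | some s => if s = "" then "success" else s
          | none => "success")
      else pvStatusOf xs := by
  simp only [pvStatusOf, List.reverse_append, List.reverse_singleton, List.singleton_append,
    List.find?]
  by_cases h : ((PySem.Dict.mk r).get? "role" == some "result") = true
  · simp [h]
  · simp [h]

lemma pvInv_step (dA : PySem.Dict String String) (dG : PySem.Dict String (List (List (String × String))))
    (h : pvInv dA dG) (row : List (String × String)) : pvInv (pvStepA dA row) (pvStepG dG row) := by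
  obtain ⟨hk, hnd, hg⟩ := h
  unfold pvStepA pvStepG
  cases hrid : (PySem.Dict.mk row).get? "round_id" with
  | none => exact ⟨hk, hnd, hg⟩
  | some rid =>
    by_cases hempty : rid = ""
    · simp only [hempty, if_pos]; exact ⟨hk, hnd, hg⟩
    simp only [if_neg hempty]
    have hcont : dA.contains rid = dG.contains rid := by
      rw [PySem.Dict.contains_eq_decide_mem_keys, PySem.Dict.contains_eq_decide_mem_keys, hk]
    set v := (match (PySem.Dict.mk row).get? "subtype" with
        | some s => if s = "" then "success" else s
        | none => "success") with hv
    by_cases hc : dG.contains rid = true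
    · -- key already present
      have hcA : dA.contains rid = true := by rw [hcont]; exact hc
      have hsd : dA.setdefault rid "running" = dA :=
        PySem.Dict.setdefault_of_contains dA "running" hcA
      have hGk : (dG.insert rid (dG.getD rid [] ++ [row])).keys = dG.keys :=
        PySem.Dict.keys_insert_of_contains dG _ hc
      have hold : dG.get? rid = some (dG.getD rid []) := by
        cases ho : dG.get? rid with
        | none => rw [PySem.Dict.get?_eq_none_iff_contains] at ho; rw [ho] at hc; cases hc
        | some old => rw [PySem.Dict.getD_of_get?_eq_some dG [] ho]
      refine ⟨?_, by rw [hGk]; exact hnd, ?_⟩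
      · rw [hsd, hGk]
        by_cases hrole : ((PySem.Dict.mk row).get? "role" == some "result") = true
        · simp only [if_pos hrole]
          rw [PySem.Dict.keys_insert_of_contains dA v hcA]; exact hk
        · simp only [if_neg hrole]; exact hk
      · intro k
        rw [hsd]
        by_cases hkr : k = rid
        · subst hkr
          rw [PySem.Dict.get?_insert_self, Option.map_some, pvStatusOf_append]
          by_cases hrole : ((PySem.Dict.mk row).get? "role" == some "result") = true
          · simp only [if_pos hrole, PySem.Dict.get?_insert_self]
            rw [hv]
          · simp only [if_neg hrole]
            rw [hg _, hold, Option.map_some]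
        · have h2 : (dG.insert rid (dG.getD rid [] ++ [row])).get? k = dG.get? k :=
            PySem.Dict.get?_insert_of_ne dG _ hkr
          by_cases hrole : ((PySem.Dict.mk row).get? "role" == some "result") = true
          · simp only [if_pos hrole]
            rw [PySem.Dict.get?_insert_of_ne dA v hkr, h2]; exact hg k
          · simp only [if_neg hrole, h2]; exact hg k
    · -- fresh key
      have hc' : dG.contains rid = false := by simpa using hc
      have hcA : dA.contains rid = false := by rw [hcont]; exact hc'
      have hsd : dA.setdefault rid "running" = dA.insert rid "running" :=
        PySem.Dict.setdefault_of_not_contains dA "running" hcA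
      have hGnone : dG.get? rid = none := (PySem.Dict.get?_eq_none_iff_contains dG rid).mpr hc'
      have hgetDold : dG.getD rid [] = [] := PySem.Dict.getD_of_get?_eq_none dG [] hGnone
      have hGk : (dG.insert rid (dG.getD rid [] ++ [row])).keys = dG.keys ++ [rid] :=
        PySem.Dict.keys_insert_of_not_contains dG _ hc'
      have hnotmem : rid ∉ dG.keys := by
        intro hm
        rw [PySem.Dict.contains_eq_decide_mem_keys] at hc'
        simp [hm] at hc'
      refine ⟨?_, ?_, ?_⟩
      · rw [hsd, hGk]
        by_cases hrole : ((PySem.Dict.mk row).get? "role" == some "result") = true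
        · simp only [if_pos hrole]
          rw [PySem.Dict.insert_insert_self,
            PySem.Dict.keys_insert_of_not_contains dA v hcA, hk]
        · simp only [if_neg hrole]
          rw [PySem.Dict.keys_insert_of_not_contains dA "running" hcA, hk]
      · rw [hGk]
        simp [List.nodup_append, hnd]
        exact fun a ha h => hnotmem (h ▸ ha)
      · intro k
        rw [hsd]
        by_cases hkr : k = rid
        · subst hkr
          by_cases hrole : ((PySem.Dict.mk row).get? "role" == some "result") = true
          · simp only [if_pos hrole]
            rw [PySem.Dict.insert_insert_self, PySem.Dict.get?_insert_self,
              PySem.Dict.get?_insert_self, hgetDold, Option.map_some, pvStatusOf_append,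
              if_pos hrole, hv]
          · simp only [if_neg hrole]
            rw [PySem.Dict.get?_insert_self, PySem.Dict.get?_insert_self, hgetDold,
              Option.map_some, pvStatusOf_append, if_neg hrole]
            simp [pvStatusOf]
        · have h2 : (dG.insert rid (dG.getD rid [] ++ [row])).get? k = dG.get? k :=
            PySem.Dict.get?_insert_of_ne dG _ hkr
          by_cases hrole : ((PySem.Dict.mk row).get? "role" == some "result") = true
          · simp only [if_pos hrole]
            rw [PySem.Dict.insert_insert_self, PySem.Dict.get?_insert_of_ne dA v hkr, h2]
            exact hg k
          · simp only [if_neg hrole]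
            rw [PySem.Dict.get?_insert_of_ne dA "running" hkr, h2]
            exact hg k

lemma pvInv_foldl (l : List (List (String × String))) (dA : PySem.Dict String String)
    (dG : PySem.Dict String (List (List (String × String)))) (h : pvInv dA dG) :
    pvInv (l.foldl pvStepA dA) (l.foldl pvStepG dG) := by
  induction l generalizing dA dG with
  | nil => exact h
  | cons row rest ih => exact ih _ _ (pvInv_step _ _ h row)

-- ===== VERDICT (by name: the statement is the Claim_ definition above) =====
theorem build_round_status_py_spec : Claim_equal_build_round_status_py := by
  intro l _
  unfold Spec_build_round_status_py build_round_status_py build_round_status_py_alt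
  have hinv : pvInv (l.foldl pvStepA PySem.Dict.empty) (l.foldl pvStepG PySem.Dict.empty) :=
    pvInv_foldl l _ _ ⟨by rw [PySem.Dict.keys_empty, PySem.Dict.keys_empty],
      by rw [PySem.Dict.keys_empty]; exact List.nodup_nil,
      fun k => by rw [PySem.Dict.get?_empty, PySem.Dict.get?_empty]; rfl⟩
  obtain ⟨hk, hnd, hg⟩ := hinv
  show (l.foldl pvStepA PySem.Dict.empty).items
      = (l.foldl pvStepG PySem.Dict.empty).items.map (fun p => (p.1, pvStatusOf p.2))
  set dA := l.foldl pvStepA PySem.Dict.empty with hdA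
  set dG := l.foldl pvStepG PySem.Dict.empty with hdG
  have hndA : dA.keys.Nodup := hk ▸ hnd
  rw [PySem.Dict.items_eq_map_keys dA hndA "", PySem.Dict.items_eq_map_keys dG hnd [],
    List.map_map, hk]
  apply List.map_congr_left
  intro k hkmem
  have hv : dG.get? k = some (dG.getD k []) := by
    cases ho : dG.get? k with
    | none =>
      exact absurd ((PySem.Dict.get?_eq_none_iff_not_mem_keys dG k).mp ho) (by simp [hkmem])
    | some w => rw [PySem.Dict.getD_of_get?_eq_some dG [] ho]
  have hAv : dA.get? k = some (pvStatusOf (dG.getD k [])) := by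
    rw [hg k, hv]; rfl
  simp [Function.comp, PySem.Dict.getD_of_get?_eq_some dA "" hAv]
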